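-- pv_equiv track=rewrite | github.com/juyongc/Up-Algorithms | PROG_상호평가.py | solution
-- ===== SOURCE A (Python) =====
-- def solution(scores):
--     answer = ''
--
--     for i in range(len(scores)):
--         stand = scores[i][i]
--         now = []
--         maxi,mini = 0,0
--         # 각 열별 유일한 최고점/최저점 여부 확인
--         for j in range(len(scores)):
--             if i != j:
--                 if scores[j][i] > stand:
--                     maxi = 1
--                 elif scores[j][i] == stand:
--                     maxi = 1
--                     mini = 1
--                 else:
--                     mini = 1
--                 now.append(scores[j][i])
--         if maxi == 1 and mini == 1: # 아니면 자신 점수도 append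
--             now.append(stand)
--         # 학점 정하기
--         tot = sum(now) // len(now)
--         if tot >= 90:
--             answer += 'A'
--         elif 80<= tot < 90:
--             answer += 'B'
--         elif 70<= tot < 80:
--             answer += 'C'
--         elif 50<= tot < 70:
--             answer += 'D'
--         else:
--             answer += 'F'
--
--     return answer
-- ===== SOURCE B (Python) =====
-- def solution(scores):
--     n = len(scores)
--     out = []
--     for i in range(n):
--         col = sorted(row[i] for row in scores)
--         s = scores[i][i]
--         # s must be dropped from the average exactly when it is a unique strict
--         # extremum, i.e. when it sits alone at one end of the sorted column.
--         if (s == col[0] and s != col[1]) or (s == col[n - 1] and s != col[n - 2]):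
--             tot = (sum(col) - s) // (n - 1)
--         else:
--             tot = sum(col) // n
--         out.append('FDCBA'[(tot >= 50) + (tot >= 70) + (tot >= 80) + (tot >= 90)])
--     return ''.join(out)
-- ===== Notes on version B (the rewrite author's own statement) =====
-- stated objective: alternative
-- what changed: B sorts each column and decides self-exclusion by looking only at the two entries at each end of the sorted column (self sits alone at an end iff it is a unique strict extremum), then computes the average arithmetically as (sum-self)//(n-1) or sum//n instead of A's element-by-element pool building with maxi/mini flags, and picks the letter by indexing 'FDCBA' with a count of passed thresholds instead of A's five-branch if-chain.
import Mathlib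
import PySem

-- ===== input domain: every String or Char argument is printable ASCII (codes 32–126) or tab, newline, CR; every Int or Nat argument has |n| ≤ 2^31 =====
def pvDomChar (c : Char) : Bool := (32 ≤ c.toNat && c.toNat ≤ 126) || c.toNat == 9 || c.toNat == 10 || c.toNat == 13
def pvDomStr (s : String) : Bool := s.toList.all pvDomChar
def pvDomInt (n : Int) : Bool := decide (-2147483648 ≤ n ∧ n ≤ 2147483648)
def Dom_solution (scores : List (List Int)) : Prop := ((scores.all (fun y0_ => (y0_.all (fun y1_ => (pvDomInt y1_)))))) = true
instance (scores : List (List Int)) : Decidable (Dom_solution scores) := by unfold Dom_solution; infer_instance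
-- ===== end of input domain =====

-- B sorts each column and reads off unique-strict-extremum status from the two entries
-- at each end of the sorted column, computing the average arithmetically from the column
-- sum; objective: alternative (different algorithm, similar cost).


-- ===== PORT A =====
def solution (scores : List (List Int)) : String :=
  (PySem.List.pyRange 0 (scores.length : Int) 1).foldl (fun answer i =>
    let stand := PySem.List.pyGetD (PySem.List.pyGetD scores i []) i 0
    let st := (PySem.List.pyRange 0 (scores.length : Int) 1).foldl
      (fun (st : List Int × Int × Int) j =>
        if i ≠ j then
          let v := PySem.List.pyGetD (PySem.List.pyGetD scores j []) i 0
          if v > stand then (st.1 ++ [v], 1, st.2.2)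
          else if v = stand then (st.1 ++ [v], 1, 1)
          else (st.1 ++ [v], st.2.1, 1)
        else st) (([], 0, 0) : List Int × Int × Int)
    let now := if st.2.1 = 1 ∧ st.2.2 = 1 then st.1 ++ [stand] else st.1
    let tot := PySem.Int.floordiv now.sum (now.length : Int)
    answer ++ (if tot ≥ 90 then "A"
      else if 80 ≤ tot ∧ tot < 90 then "B"
      else if 70 ≤ tot ∧ tot < 80 then "C"
      else if 50 ≤ tot ∧ tot < 70 then "D"
      else "F")) ""

-- ===== PORT B =====
def solution_alt (scores : List (List Int)) : String :=
  let n : Int := (scores.length : Int)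
  String.ofList ((PySem.List.pyRange 0 n 1).map (fun i =>
    let col := PySem.List.sorted (scores.map (fun row => PySem.List.pyGetD row i 0)) (fun x => x) false
    let s := PySem.List.pyGetD (PySem.List.pyGetD scores i []) i 0
    let tot := if (s = PySem.List.pyGetD col 0 0 ∧ s ≠ PySem.List.pyGetD col 1 0) ∨
                  (s = PySem.List.pyGetD col (n - 1) 0 ∧ s ≠ PySem.List.pyGetD col (n - 2) 0)
      then PySem.Int.floordiv (col.sum - s) (n - 1)
      else PySem.Int.floordiv col.sum n
    PySem.List.pyGetD ['F', 'D', 'C', 'B', 'A']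
      ((if 50 ≤ tot then (1 : Int) else 0) + (if 70 ≤ tot then 1 else 0) +
       (if 80 ≤ tot then 1 else 0) + (if 90 ≤ tot then 1 else 0)) ' '))

-- ===== PRECONDITION & SPEC =====
-- Pre_ excludes exactly the inputs on which the Python A raises: a single-row matrix
-- (ZeroDivisionError: the lone column entry is its own unique extremum, leaving an empty
-- list to average) and a matrix with a row shorter than the number of rows (IndexError
-- on scores[j][i]).  B raises on exactly the same inputs.
def Pre_solution (scores : List (List Int)) : Prop :=
  scores.length ≠ 1 ∧ ∀ row ∈ scores, scores.length ≤ row.length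
instance (scores : List (List Int)) : Decidable (Pre_solution scores) := by
  unfold Pre_solution; infer_instance
def pvWitness_solution : List (List Int) := [[10, 90], [80, 70]]
def Spec_solution (scores : List (List Int)) (out : String) : Prop := out = solution_alt scores
instance (scores : List (List Int)) (out : String) : Decidable (Spec_solution scores out) := by
  unfold Spec_solution; infer_instance

-- ===== CLAIM (what is proved, stated in full; the proofs are below) =====
def Claim_equal_solution : Prop := ∀ (scores : List (List Int)), Dom_solution scores → Pre_solution scores → Spec_solution scores (solution scores)

-- ===== LEMMAS AND PROOFS =====
-- ===== proof-side mirrors (definitionally equal to the ports' loop bodies) =====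
def pvInner (scores : List (List Int)) (i : Int) : List Int × Int × Int :=
  (PySem.List.pyRange 0 (scores.length : Int) 1).foldl
    (fun (st : List Int × Int × Int) j =>
      if i ≠ j then
        let v := PySem.List.pyGetD (PySem.List.pyGetD scores j []) i 0
        if v > PySem.List.pyGetD (PySem.List.pyGetD scores i []) i 0 then (st.1 ++ [v], 1, st.2.2)
        else if v = PySem.List.pyGetD (PySem.List.pyGetD scores i []) i 0 then (st.1 ++ [v], 1, 1)
        else (st.1 ++ [v], st.2.1, 1)
      else st) (([], 0, 0) : List Int × Int × Int)

def pvNow (scores : List (List Int)) (i : Int) : List Int :=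
  if (pvInner scores i).2.1 = 1 ∧ (pvInner scores i).2.2 = 1
  then (pvInner scores i).1 ++ [PySem.List.pyGetD (PySem.List.pyGetD scores i []) i 0]
  else (pvInner scores i).1

def pvGradeA (tot : Int) : String :=
  if tot ≥ 90 then "A"
  else if 80 ≤ tot ∧ tot < 90 then "B"
  else if 70 ≤ tot ∧ tot < 80 then "C"
  else if 50 ≤ tot ∧ tot < 70 then "D"
  else "F"

def pvColB (scores : List (List Int)) (i : Int) : List Int :=
  scores.map (fun row => PySem.List.pyGetD row i 0)

def pvSortB (scores : List (List Int)) (i : Int) : List Int :=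
  PySem.List.sorted (pvColB scores i) (fun x => x) false

def pvTotB (scores : List (List Int)) (i : Int) : Int :=
  if (PySem.List.pyGetD (PySem.List.pyGetD scores i []) i 0 = PySem.List.pyGetD (pvSortB scores i) 0 0 ∧
      PySem.List.pyGetD (PySem.List.pyGetD scores i []) i 0 ≠ PySem.List.pyGetD (pvSortB scores i) 1 0) ∨
     (PySem.List.pyGetD (PySem.List.pyGetD scores i []) i 0
        = PySem.List.pyGetD (pvSortB scores i) ((scores.length : Int) - 1) 0 ∧
      PySem.List.pyGetD (PySem.List.pyGetD scores i []) i 0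
        ≠ PySem.List.pyGetD (pvSortB scores i) ((scores.length : Int) - 2) 0)
  then PySem.Int.floordiv ((pvSortB scores i).sum - PySem.List.pyGetD (PySem.List.pyGetD scores i []) i 0)
        ((scores.length : Int) - 1)
  else PySem.Int.floordiv (pvSortB scores i).sum (scores.length : Int)

def pvCharB (scores : List (List Int)) (i : Int) : Char :=
  PySem.List.pyGetD ['F', 'D', 'C', 'B', 'A']
    ((if 50 ≤ pvTotB scores i then (1 : Int) else 0) + (if 70 ≤ pvTotB scores i then 1 else 0) +
     (if 80 ≤ pvTotB scores i then 1 else 0) + (if 90 ≤ pvTotB scores i then 1 else 0)) ' '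

theorem pv_getD_nil (i : Int) : PySem.List.pyGetD ([] : List Int) i 0 = 0 := by
  simp [PySem.List.pyGetD, PySem.List.pyGet?, PySem.List.pyIdx?]

theorem pv_col_entry (scores : List (List Int)) (i j : Int) :
    PySem.List.pyGetD (PySem.List.pyGetD scores j []) i 0
      = PySem.List.pyGetD (scores.map (fun row => PySem.List.pyGetD row i 0)) j 0 := by
  have h := PySem.List.pyGetD_map (fun row => PySem.List.pyGetD row i 0) scores j []
  rw [pv_getD_nil i] at h
  exact h.symm

theorem pv_col_entry' (scores : List (List Int)) (i j : Int) :
    PySem.List.pyGetD (PySem.List.pyGetD scores j []) i 0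
      = PySem.List.pyGetD (pvColB scores i) j 0 :=
  pv_col_entry scores i j

theorem pv_flag (c : Bool) : ((if c = true then (1:Int) else 0) = 1) ↔ c = true := by
  cases c <;> simp

theorem pv_innerA (i stand : Int) (val : Int → Int) (js : List Int) (st : List Int × Int × Int) :
    List.foldl (fun (st : List Int × Int × Int) j => if i = j then st else
      (st.1 ++ [val j],
       if stand ≤ val j then (1 : Int) else st.2.1,
       if val j ≤ stand then (1 : Int) else st.2.2)) st js
    = (st.1 ++ (js.filter (fun j => decide ¬(i = j))).map val,
       if (js.filter (fun j => decide ¬(i = j))).any (fun j => decide (stand ≤ val j)) then 1 else st.2.1,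
       if (js.filter (fun j => decide ¬(i = j))).any (fun j => decide (val j ≤ stand)) then 1 else st.2.2) := by
  induction js generalizing st with
  | nil => simp
  | cons j js ih =>
    rw [List.foldl_cons]
    by_cases h : i = j
    · rw [if_pos h, ih]
      have hd : (decide ¬(i = j)) = false := by simp [h]
      simp only [List.filter_cons, hd, Bool.false_eq_true, if_false]
    · rw [if_neg h, ih]
      have hd : (decide ¬(i = j)) = true := by simp [h]
      simp only [List.filter_cons, hd, if_true, List.map_cons, List.any_cons]
      refine Prod.ext (by simp) (Prod.ext ?_ ?_) <;> dsimp only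
      · cases han : (js.filter (fun j => decide ¬(i = j))).any (fun j => decide (stand ≤ val j)) <;>
          by_cases hj : stand ≤ val j <;> simp [hj]
      · cases han : (js.filter (fun j => decide ¬(i = j))).any (fun j => decide (val j ≤ stand)) <;>
          by_cases hj : val j ≤ stand <;> simp [hj]

theorem pv_foldl_str (g : Int → Char) (l : List Int) (acc : String) :
    l.foldl (fun a i => a ++ String.ofList [g i]) acc = acc ++ String.ofList (l.map g) := by
  induction l generalizing acc with
  | nil => simp
  | cons x l ih =>
    rw [List.foldl_cons, List.map_cons, ih, String.append_assoc, ← String.ofList_append,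
      List.singleton_append]

theorem pv_map_range_take (col : List Int) (m : Int) (h0 : 0 ≤ m) (h1 : m ≤ (col.length : Int)) :
    (PySem.List.pyRange 0 m 1).map (fun j => PySem.List.pyGetD col j 0) = col.take m.toNat := by
  have hsplit := PySem.List.pyRange_one_append 0 m (col.length : Int) h0 h1
  have hall := PySem.List.map_pyGetD_pyRange_zero col 0
  have hdrop := PySem.List.map_pyGetD_pyRange col 0 h0
  rw [PySem.List.len_eq] at hall hdrop
  rw [hsplit, List.map_append, hdrop] at hall
  have h2 := congrArg (List.take m.toNat) hall
  rw [List.take_append_of_le_length (by rw [List.length_map, PySem.List.length_pyRange_one]; omega),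
    List.take_of_length_le (by rw [List.length_map, PySem.List.length_pyRange_one]; omega)] at h2
  exact h2

theorem pv_others (col : List Int) (i : Int) (h0 : 0 ≤ i) (h1 : i < (col.length : Int)) :
    ((PySem.List.pyRange 0 (col.length : Int) 1).filter (fun j => decide ¬(i = j))).map
        (fun j => PySem.List.pyGetD col j 0)
      = col.take i.toNat ++ col.drop (i + 1).toNat := by
  have hsplit1 := PySem.List.pyRange_one_append 0 i (col.length : Int) h0 (le_of_lt h1)
  have hsplit2 := PySem.List.pyRange_one_append i (i + 1) (col.length : Int) (by omega) (by omega)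
  rw [hsplit1, hsplit2, List.filter_append, List.filter_append]
  have hf1 : (PySem.List.pyRange 0 i 1).filter (fun j => decide ¬(i = j)) = PySem.List.pyRange 0 i 1 := by
    apply List.filter_eq_self.mpr
    intro j hj
    have := PySem.List.mem_pyRange_one.mp hj
    simp; omega
  have hf2 : (PySem.List.pyRange i (i + 1) 1).filter (fun j => decide ¬(i = j)) = [] := by
    rw [PySem.List.pyRange_one_singleton]
    simp
  have hf3 : (PySem.List.pyRange (i + 1) (col.length : Int) 1).filter (fun j => decide ¬(i = j))
      = PySem.List.pyRange (i + 1) (col.length : Int) 1 := by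
    apply List.filter_eq_self.mpr
    intro j hj
    have := PySem.List.mem_pyRange_one.mp hj
    simp; omega
  rw [hf1, hf2, hf3, List.nil_append, List.map_append, pv_map_range_take col i h0 (le_of_lt h1)]
  congr 1
  have h3 := PySem.List.map_pyGetD_pyRange col 0 (a := i + 1) (by omega)
  rw [PySem.List.len_eq] at h3
  rw [h3]

-- unique strict minimum read off a nondecreasing rearrangement's first two entries
theorem pv_unique_min (s a b : Int) (t others : List Int)
    (hperm : (a :: b :: t).Perm (s :: others))
    (hpw : (a :: b :: t).Pairwise (fun x y => x ≤ y)) :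
    (s = a ∧ s ≠ b) ↔ ∀ v ∈ others, s < v := by
  rcases List.pairwise_cons.mp hpw with ⟨hab, hpw2⟩
  rcases List.pairwise_cons.mp hpw2 with ⟨hbt, _⟩
  have hab' : a ≤ b := hab b (by simp)
  constructor
  · rintro ⟨h1, h2⟩ v hv
    subst h1
    have hsb : s < b := lt_of_le_of_ne hab' h2
    have hta : t.count s = 0 :=
      List.count_eq_zero.mpr (fun hx => absurd (hbt s hx) (not_le.mpr hsb))
    have hc := hperm.count_eq s
    have hso : others.count s = 0 := by
      simp [hta, Ne.symm h2] at hc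
      omega
    have hnot : s ∉ others := by
      intro hm
      have := List.count_pos_iff.mpr hm
      omega
    have hvc : v ∈ s :: b :: t := hperm.mem_iff.mpr (List.mem_cons_of_mem _ hv)
    rcases List.mem_cons.mp hvc with h | h
    · exact absurd (h ▸ hv) hnot
    · rcases List.mem_cons.mp h with h' | h'
      · omega
      · exact lt_of_lt_of_le hsb (hbt v h')
  · intro h
    have hnot : s ∉ others := fun hm => lt_irrefl s (h s hm)
    have hale : ∀ y ∈ a :: b :: t, a ≤ y := by
      intro y hy
      rcases List.mem_cons.mp hy with h' | h'
      · omega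
      · exact hab y h'
    have has : a ≤ s := hale s (hperm.mem_iff.mpr List.mem_cons_self)
    have hamem : a ∈ s :: others := hperm.mem_iff.mp List.mem_cons_self
    have ha : s = a := by
      rcases List.mem_cons.mp hamem with h' | h'
      · exact h'.symm
      · exact absurd has (not_le.mpr (h a h'))
    refine ⟨ha, ?_⟩
    intro hb
    subst hb
    subst ha
    have hc := hperm.count_eq s
    have hso : others.count s = 0 := List.count_eq_zero.mpr hnot
    simp [hso] at hc

-- unique strict maximum read off a nonincreasing rearrangement's first two entries
theorem pv_unique_max (s a b : Int) (t others : List Int)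
    (hperm : (a :: b :: t).Perm (s :: others))
    (hpw : (a :: b :: t).Pairwise (fun x y => y ≤ x)) :
    (s = a ∧ s ≠ b) ↔ ∀ v ∈ others, v < s := by
  rcases List.pairwise_cons.mp hpw with ⟨hab, hpw2⟩
  rcases List.pairwise_cons.mp hpw2 with ⟨hbt, _⟩
  have hab' : b ≤ a := hab b (by simp)
  constructor
  · rintro ⟨h1, h2⟩ v hv
    subst h1
    have hsb : b < s := lt_of_le_of_ne hab' (fun he => h2 he.symm)
    have hta : t.count s = 0 :=
      List.count_eq_zero.mpr (fun hx => absurd (hbt s hx) (not_le.mpr hsb))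
    have hc := hperm.count_eq s
    have hso : others.count s = 0 := by
      simp [hta, Ne.symm h2] at hc
      omega
    have hnot : s ∉ others := by
      intro hm
      have := List.count_pos_iff.mpr hm
      omega
    have hvc : v ∈ s :: b :: t := hperm.mem_iff.mpr (List.mem_cons_of_mem _ hv)
    rcases List.mem_cons.mp hvc with h | h
    · exact absurd (h ▸ hv) hnot
    · rcases List.mem_cons.mp h with h' | h'
      · omega
      · exact lt_of_le_of_lt (hbt v h') hsb
  · intro h
    have hnot : s ∉ others := fun hm => lt_irrefl s (h s hm)
    have hale : ∀ y ∈ a :: b :: t, y ≤ a := by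
      intro y hy
      rcases List.mem_cons.mp hy with h' | h'
      · omega
      · exact hab y h'
    have has : s ≤ a := hale s (hperm.mem_iff.mpr List.mem_cons_self)
    have hamem : a ∈ s :: others := hperm.mem_iff.mp List.mem_cons_self
    have ha : s = a := by
      rcases List.mem_cons.mp hamem with h' | h'
      · exact h'.symm
      · exact absurd has (not_le.mpr (h a h'))
    refine ⟨ha, ?_⟩
    intro hb
    subst hb
    subst ha
    have hc := hperm.count_eq s
    have hso : others.count s = 0 := List.count_eq_zero.mpr hnot
    simp [hso] at hc

theorem pv_grade (tot : Int) :
    pvGradeA tot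
    = String.ofList [PySem.List.pyGetD ['F', 'D', 'C', 'B', 'A']
        ((if 50 ≤ tot then (1 : Int) else 0) + (if 70 ≤ tot then 1 else 0) +
         (if 80 ≤ tot then 1 else 0) + (if 90 ≤ tot then 1 else 0)) ' '] := by
  unfold pvGradeA
  split_ifs <;> first | decide | omega

theorem pv_tot (scores : List (List Int)) (i : Int) (h0 : 0 ≤ i) (h1 : i < (scores.length : Int))
    (h2 : 2 ≤ scores.length) :
    PySem.Int.floordiv (pvNow scores i).sum ((pvNow scores i).length : Int) = pvTotB scores i := by
  have hclen : (pvColB scores i).length = scores.length := by simp [pvColB]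
  have h1' : i < ((pvColB scores i).length : Int) := by rw [hclen]; exact_mod_cast h1
  have hkl : i.toNat < (pvColB scores i).length := by omega
  have hsplit : pvColB scores i
      = (pvColB scores i).take i.toNat ++ (pvColB scores i)[i.toNat] :: (pvColB scores i).drop (i.toNat + 1) := by
    rw [← List.drop_eq_getElem_cons hkl, List.take_append_drop]
  have hstand : PySem.List.pyGetD (PySem.List.pyGetD scores i []) i 0 = (pvColB scores i)[i.toNat] := by
    rw [pv_col_entry scores i i]
    exact PySem.List.pyGetD_eq_getElem (pvColB scores i) 0 h0 h1'
  set col := pvColB scores i with hcol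
  set s : Int := col[i.toNat] with hs
  set l1 := col.take i.toNat with hl1
  set l2 := col.drop (i.toNat + 1) with hl2
  rw [← hcol] at hsplit
  -- A's inner loop characterization
  have hinner : pvInner scores i = (l1 ++ l2,
      if (l1 ++ l2).any (fun v => decide (s ≤ v)) then 1 else 0,
      if (l1 ++ l2).any (fun v => decide (v ≤ s)) then 1 else 0) := by
    unfold pvInner
    rw [PySem.List.foldl_congr_mem _ _ (fun (st : List Int × Int × Int) j => if i = j then st else
      (st.1 ++ [PySem.List.pyGetD col j 0],
       if s ≤ PySem.List.pyGetD col j 0 then (1 : Int) else st.2.1,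
       if PySem.List.pyGetD col j 0 ≤ s then (1 : Int) else st.2.2)) _ ?_]
    · rw [pv_innerA]
      have hcc : (scores.length : Int) = ((col.length : Int)) := by rw [hclen]
      rw [hcc]
      have hoth := pv_others col i h0 h1'
      have ht1 : (i + 1).toNat = i.toNat + 1 := by omega
      rw [ht1] at hoth
      refine Prod.ext ?_ (Prod.ext ?_ ?_) <;> dsimp only
      · rw [List.nil_append, hoth]
      · rw [← hoth, List.any_map]
        rfl
      · rw [← hoth, List.any_map]
        rfl
    · intro st j hj
      by_cases h : i = j
      · simp [h]
      · rw [if_pos h]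
        rw [hstand, pv_col_entry' scores i j, ← hcol]
        dsimp only
        rw [if_neg h]
        split_ifs <;> first | rfl | (exfalso; omega)
  have hnow : pvNow scores i
      = if ((l1 ++ l2).any (fun v => decide (s ≤ v)) = true) ∧
           ((l1 ++ l2).any (fun v => decide (v ≤ s)) = true)
        then (l1 ++ l2) ++ [s] else l1 ++ l2 := by
    unfold pvNow
    rw [hinner, hstand]
    simp only [pv_flag]
  -- B's sorted column in cons-cons form
  have hperm0 : (pvSortB scores i).Perm col := PySem.List.sorted_perm col (fun x => x) false
  have hslen : (pvSortB scores i).length = scores.length := by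
    rw [hperm0.length_eq, hclen]
  have hpw : (pvSortB scores i).Pairwise (fun x y => x ≤ y) :=
    PySem.List.sorted_pairwise col (fun x => x)
  have hpermc : (pvSortB scores i).Perm (s :: (l1 ++ l2)) := by
    have h' := hperm0
    rw [hsplit] at h'
    exact h'.trans List.perm_middle
  set cs := pvSortB scores i with hcs
  obtain ⟨a, b, t, hct⟩ : ∃ a b t, cs = a :: b :: t := by
    rcases hr : cs with _ | ⟨a, _ | ⟨b, t⟩⟩
    · have hl := congrArg List.length hr
      simp only [List.length_nil] at hl
      omega
    · have hl := congrArg List.length hr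
      simp only [List.length_cons, List.length_nil] at hl
      omega
    · exact ⟨_, _, _, rfl⟩
  -- reversed form for the max end
  obtain ⟨x, y, t2, hrt⟩ : ∃ x y t2, cs.reverse = x :: y :: t2 := by
    rcases hr : cs.reverse with _ | ⟨x, _ | ⟨y, t2⟩⟩
    · have hl := congrArg List.length hr
      simp only [List.length_reverse, List.length_nil] at hl
      omega
    · have hl := congrArg List.length hr
      simp only [List.length_reverse, List.length_cons, List.length_nil] at hl
      omega
    · exact ⟨_, _, _, rfl⟩
  have hpermr : (cs.reverse).Perm (s :: (l1 ++ l2)) := (cs.reverse_perm).trans hpermc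
  have hpwr : (cs.reverse).Pairwise (fun u v => v ≤ u) := List.pairwise_reverse.mpr hpw
  -- index computations
  have hcl : (cs.length : Int) = (scores.length : Int) := by exact_mod_cast hslen
  have hg0 : PySem.List.pyGetD cs 0 0 = a := by rw [hct]; simp [PySem.List.pyGetD_ofNat']
  have hg1 : PySem.List.pyGetD cs 1 0 = b := by rw [hct]; simp [PySem.List.pyGetD_ofNat']
  have hgl1 : PySem.List.pyGetD cs ((scores.length : Int) - 1) 0 = x := by
    rw [PySem.List.pyGetD_eq_getElem cs 0 (by omega) (by rw [hcl]; omega)]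
    rw [getElem_congr_idx (show ((scores.length : Int) - 1).toNat = cs.length - 1 - 0 by omega),
        ← List.getElem_reverse, getElem_congr_coll hrt] <;> simp [hrt]
  have hgl2 : PySem.List.pyGetD cs ((scores.length : Int) - 2) 0 = y := by
    rw [PySem.List.pyGetD_eq_getElem cs 0 (by omega) (by rw [hcl]; omega)]
    rw [getElem_congr_idx (show ((scores.length : Int) - 2).toNat = cs.length - 1 - 1 by omega),
        ← List.getElem_reverse, getElem_congr_coll hrt] <;> simp [hrt]
  -- condition correspondence
  have hsum : cs.sum = l1.sum + s + l2.sum := by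
    rw [hpermc.sum_eq]
    simp [List.sum_append]
    ring
  rw [hct] at hpermc hpw
  rw [hrt] at hpermr hpwr
  have hmin := pv_unique_min s a b t (l1 ++ l2) hpermc hpw
  have hmax := pv_unique_max s x y t2 (l1 ++ l2) hpermr hpwr
  have hlen12 : l1.length + 1 + l2.length = scores.length := by
    have := congrArg List.length hsplit
    simp at this
    omega
  -- put both sides in the same shape
  unfold pvTotB
  rw [← hcs, hg0, hg1, hgl1, hgl2, hstand, hnow]
  by_cases hcond : ((l1 ++ l2).any (fun v => decide (s ≤ v)) = true) ∧
      ((l1 ++ l2).any (fun v => decide (v ≤ s)) = true)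
  · rw [if_pos hcond, if_neg ?_]
    · congr 1
      · rw [hsum]
        simp [List.sum_append]
        ring
      · simp
        omega
    · rintro (hone | hone)
      · have hall := hmin.mp hone
        rcases List.any_eq_true.mp hcond.2 with ⟨v, hv, hv2⟩
        exact absurd (hall v hv) (by simp at hv2; omega)
      · have hall := hmax.mp hone
        rcases List.any_eq_true.mp hcond.1 with ⟨v, hv, hv2⟩
        exact absurd (hall v hv) (by simp at hv2; omega)
  · rw [if_neg hcond, if_pos ?_]
    · congr 1
      · rw [hsum]
        simp [List.sum_append]
        ring
      · simp only [List.length_append]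
        push_cast
        omega
    · rcases Decidable.not_and_iff_or_not.mp hcond with hna | hna
      · right
        refine hmax.mpr ?_
        intro v hv
        have := List.any_eq_false.mp (Bool.eq_false_iff.mpr hna) v hv
        simp at this
        omega
      · left
        refine hmin.mpr ?_
        intro v hv
        have := List.any_eq_false.mp (Bool.eq_false_iff.mpr hna) v hv
        simp at this
        omega

theorem pv_char (scores : List (List Int)) (i : Int) (h0 : 0 ≤ i) (h1 : i < (scores.length : Int))
    (h2 : 2 ≤ scores.length) :
    pvGradeA (PySem.Int.floordiv (pvNow scores i).sum ((pvNow scores i).length : Int))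
    = String.ofList [pvCharB scores i] := by
  rw [pv_tot scores i h0 h1 h2]
  exact pv_grade _

theorem solution_eq (scores : List (List Int)) (hn : scores.length ≠ 1) :
    solution scores = solution_alt scores := by
  by_cases h0 : scores.length = 0
  · rcases List.length_eq_zero_iff.mp h0 with rfl
    rfl
  · have h2 : 2 ≤ scores.length := by omega
    unfold solution solution_alt
    rw [PySem.List.foldl_congr_mem _ _
      (fun (a : String) i => a ++ String.ofList [pvCharB scores i]) _
      (by
        intro acc i hi
        have hm := PySem.List.mem_pyRange_one.mp hi
        exact congrArg (acc ++ ·) (pv_char scores i hm.1 hm.2 h2))]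
    rw [pv_foldl_str]
    rfl

-- ===== VERDICT (by name: the statement is the Claim_ definition above) =====
theorem solution_spec : Claim_equal_solution := by
  intro scores _ hpre
  unfold Spec_solution
  exact solution_eq scores hpre.1
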